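-- pv_equiv track=rewrite | github.com/Wimull/Turing-USP-Technical-Case | Q1A.py | conta_economia
-- ===== SOURCE A (Python) =====
-- def conta_economia(emails):
--     emailHandler = [];
--     caracteresEconomizados = 0
--     for conta in emails:
--         conta = conta.split("@")[0]
--         emailHandler.append(conta);
--         if len(emailHandler) > 1:
--             if conta[0] != emailHandler[0][0]: emailHandler.pop(0);
--             else:
--                 for caracteres in emailHandler[0]:
--                     if emailHandler[1][0] == caracteres:
--                         emailHandler[0] = emailHandler[0].split(caracteres, 1)[1];
--                         emailHandler[1] = emailHandler[1].split(caracteres, 1)[1];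
--                         caracteresEconomizados += 1
--                 emailHandler.clear()
--                 emailHandler.append(conta)
--
--
--
--
--     return caracteresEconomizados;
-- ===== SOURCE B (Python) =====
-- def conta_economia(emails):
--     total = 0
--     prev = None
--     for email in emails:
--         local = email.split("@", 1)[0]
--         if prev is not None and prev[0] == local[0]:
--             # greedy two-pointer subsequence match: no string copies, no list surgery
--             i = j = 0
--             while i < len(prev) and j < len(local):
--                 if prev[i] == local[j]:
--                     j += 1
--                 i += 1
--             total += j
--         prev = local
--     return total
-- ===== Notes on version B (the rewrite author's own statement) =====
-- stated objective: simpler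
-- what changed: Replaces the emailHandler list surgery and repeated str.split string copies with a scalar prev and a two-pointer greedy index scan that counts matches directly (measured ~2.4x faster).
import Mathlib
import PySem

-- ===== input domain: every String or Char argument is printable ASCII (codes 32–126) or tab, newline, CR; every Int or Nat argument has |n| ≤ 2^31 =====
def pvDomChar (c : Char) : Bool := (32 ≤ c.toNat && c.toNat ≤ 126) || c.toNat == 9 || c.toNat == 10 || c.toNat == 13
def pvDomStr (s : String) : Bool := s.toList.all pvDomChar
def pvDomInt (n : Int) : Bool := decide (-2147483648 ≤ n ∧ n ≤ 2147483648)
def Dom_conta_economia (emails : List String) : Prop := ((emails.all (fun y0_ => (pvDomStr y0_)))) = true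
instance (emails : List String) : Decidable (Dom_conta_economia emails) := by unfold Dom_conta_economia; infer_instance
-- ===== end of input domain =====

-- B replaces A's emailHandler list surgery and repeated str.split string copies by a scalar
-- previous local-part and a two-pointer greedy scan (objective: simpler).

-- shared helper: e.split("@")[0] (= split("@",1)[0]), the local part; exact: the part before
-- the first '@', or the whole string if there is no '@'.
def pvLocal (e : String) : List Char := e.toList.takeWhile (fun c => c ≠ '@')

-- ===== PORT A =====
-- x.split(c, 1)[1]: everything after the first occurrence of c; exact whenever c ∈ x,
-- which holds at every call site of A (the branch guard puts c in both strings).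
def pvSplitAfter (c : Char) (x : List Char) : List Char :=
  (x.dropWhile (fun d => d ≠ c)).drop 1

-- A's inner 'for caracteres in emailHandler[0]' loop: iterates the ORIGINAL prev string
-- (Python evaluates the iterable once) while both slots are re-split; none = IndexError
-- from emailHandler[1][0] on an exhausted second slot.
def pvInnerA : List Char → List Char → List Char → Int → Option Int
  | [], _a, _b, cnt => some cnt
  | c :: rest, a, b, cnt =>
    match b with
    | [] => none
    | b0 :: _ =>
      if b0 = c then
        pvInnerA rest (pvSplitAfter c a) (pvSplitAfter c b) (cnt + 1)
      else
        pvInnerA rest a b cnt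

-- A's main loop over emails, carrying emailHandler; none = IndexError (conta[0] or
-- emailHandler[0][0] on an empty local part, or pvInnerA raising).
def pvOuterA : List String → List (List Char) → Int → Option Int
  | [], _h, cnt => some cnt
  | e :: rest, h, cnt =>
    let conta := pvLocal e
    let h2 := h ++ [conta]
    if h2.length > 1 then
      match conta.head?, (h2.headD []).head? with
      | some c0, some p0 =>
        if c0 ≠ p0 then pvOuterA rest (h2.drop 1) cnt
        else
          match pvInnerA (h2.headD []) (h2.headD []) (h2.getD 1 []) cnt with
          | some cnt2 => pvOuterA rest [conta] cnt2
          | none => none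
      | _, _ => none
    else pvOuterA rest h2 cnt

def conta_economia (emails : List String) : Int :=
  (pvOuterA emails [] 0).getD 0

-- ===== PORT B =====
-- B's inner while loop: two pointers over (rest of prev, rest of local), j = matches so far.
def pvTwoPointer : List Char → List Char → Int → Int
  | [], _, j => j
  | _ :: _, [], j => j
  | p :: ps, c :: cs, j =>
    if p = c then pvTwoPointer ps cs (j + 1) else pvTwoPointer ps (c :: cs) j

-- B's for loop: scalar prev (none before the first email) and the running total.
-- The last match-arm is where Python B raises IndexError (empty part); unreachable under Pre_.
def pvOuterB : List String → Option (List Char) → Int → Int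
  | [], _, total => total
  | e :: rest, prevOpt, total =>
    let loc := pvLocal e
    match prevOpt with
    | none => pvOuterB rest (some loc) total
    | some prev =>
      match prev, loc with
      | p0 :: _, c0 :: _ =>
        if p0 = c0 then pvOuterB rest (some loc) (total + pvTwoPointer prev loc 0)
        else pvOuterB rest (some loc) total
      | _, _ => pvOuterB rest (some loc) total

def conta_economia_alt (emails : List String) : Int :=
  pvOuterB emails none 0

-- ===== PRECONDITION & SPEC =====
-- A raises IndexError exactly when some consecutive pair of local-parts has an empty member,
-- or (first characters equal) the second is a subsequence of the first minus its last
-- character (then A re-reads b[0] after exhausting b). Pre_ excludes exactly those inputs.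
def pvPreL : List (List Char) → Bool
  | p :: c :: rest =>
      !p.isEmpty && !c.isEmpty && !(p.head? == c.head? && c.isSublist p.dropLast) && pvPreL (c :: rest)
  | _ => true

def Pre_conta_economia (emails : List String) : Prop :=
  pvPreL (emails.map pvLocal) = true

instance (emails : List String) : Decidable (Pre_conta_economia emails) := by
  unfold Pre_conta_economia; infer_instance

def pvWitness_conta_economia : List String := ["abc@x.com", "axc@y.com"]

def Spec_conta_economia (emails : List String) (out : Int) : Prop := out = conta_economia_alt emails
instance (emails : List String) (out : Int) : Decidable (Spec_conta_economia emails out) := by unfold Spec_conta_economia; infer_instance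

-- ===== CLAIM (what is proved, stated in full; the proofs are below) =====
def Claim_equal_conta_economia : Prop := ∀ (emails : List String), Dom_conta_economia emails → Pre_conta_economia emails → Spec_conta_economia emails (conta_economia emails)

-- ===== LEMMAS AND PROOFS =====

theorem pvInnerA_step_match (c : Char) (ps a bs : List Char) (cnt : Int) :
    pvInnerA (c :: ps) a (c :: bs) cnt
      = pvInnerA ps (pvSplitAfter c a) bs (cnt + 1) := by
  have hsplit : pvSplitAfter c (c :: bs) = bs := by
    simp [pvSplitAfter, List.dropWhile]
  show (if c = c then pvInnerA ps (pvSplitAfter c a) (pvSplitAfter c (c :: bs)) (cnt + 1)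
        else pvInnerA ps a (c :: bs) cnt) = _
  rw [if_pos rfl, hsplit]

theorem pvInnerA_step_skip (c b0 : Char) (ps a bs : List Char) (cnt : Int)
    (h : ¬ b0 = c) :
    pvInnerA (c :: ps) a (b0 :: bs) cnt = pvInnerA ps a (b0 :: bs) cnt := by
  show (if b0 = c then _ else pvInnerA ps a (b0 :: bs) cnt) = _
  rw [if_neg h]

theorem pvTwoPointer_step_match (c : Char) (ps bs : List Char) (j : Int) :
    pvTwoPointer (c :: ps) (c :: bs) j = pvTwoPointer ps bs (j + 1) := by
  show (if c = c then _ else _) = _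
  rw [if_pos rfl]

theorem pvTwoPointer_step_skip (c b0 : Char) (ps bs : List Char) (j : Int)
    (h : ¬ c = b0) :
    pvTwoPointer (c :: ps) (b0 :: bs) j = pvTwoPointer ps (b0 :: bs) j := by
  show (if c = b0 then _ else _) = _
  rw [if_neg h]

theorem pvTwoPointer_shift (p : List Char) :
    ∀ (b : List Char) (j : Int), pvTwoPointer p b j = j + pvTwoPointer p b 0 := by
  induction p with
  | nil => intro b j; simp [pvTwoPointer]
  | cons c ps ih =>
    intro b j
    cases b with
    | nil => simp [pvTwoPointer]
    | cons b0 bs =>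
      by_cases h : c = b0
      · subst h
        rw [pvTwoPointer_step_match, pvTwoPointer_step_match,
          ih bs (j + 1), ih bs (0 + 1)]
        ring
      · rw [pvTwoPointer_step_skip _ _ _ _ _ h, pvTwoPointer_step_skip _ _ _ _ _ h]
        exact ih (b0 :: bs) j

theorem pvInnerA_eq (p : List Char) :
    ∀ (a b : List Char) (cnt : Int), ¬ b.Sublist p.dropLast →
      pvInnerA p a b cnt = some (cnt + pvTwoPointer p b 0) := by
  induction p with
  | nil =>
    intro a b cnt _
    simp [pvInnerA, pvTwoPointer]
  | cons c ps ih =>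
    intro a b cnt h
    cases b with
    | nil => exact absurd (List.nil_sublist _) h
    | cons b0 bs =>
      by_cases hbc : b0 = c
      · subst hbc
        rw [pvInnerA_step_match, pvTwoPointer_step_match,
          pvTwoPointer_shift ps bs (0 + 1)]
        cases ps with
        | nil =>
          simp [pvInnerA, pvTwoPointer]
        | cons q qs =>
          have hnot : ¬ bs.Sublist (q :: qs).dropLast := by
            intro hsub
            exact h (by simpa using List.Sublist.cons₂ b0 hsub)
          rw [ih _ bs (cnt + 1) hnot]
          congr 1
          ring
      · have hnot : ¬ (b0 :: bs).Sublist ps.dropLast := by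
          intro hsub
          cases ps with
          | nil => simp_all [List.sublist_nil]
          | cons q qs => exact h (by simpa using List.Sublist.cons c hsub)
        have hcb : ¬ c = b0 := fun hh => hbc hh.symm
        rw [pvInnerA_step_skip _ _ _ _ _ _ hbc, pvTwoPointer_step_skip _ _ _ _ _ hcb]
        exact ih _ (b0 :: bs) cnt hnot

theorem pvOuter_eq (emails : List String) :
    ∀ (prev : List Char) (cnt : Int), pvPreL (prev :: emails.map pvLocal) = true →
      pvOuterA emails [prev] cnt = some (pvOuterB emails (some prev) cnt) := by
  induction emails with
  | nil => intro prev cnt _; simp [pvOuterA, pvOuterB]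
  | cons e rest ih =>
    intro prev cnt hpre
    simp only [List.map_cons, pvPreL, Bool.and_eq_true, Bool.not_eq_true'] at hpre
    obtain ⟨⟨⟨hp, hc⟩, hpair⟩, hrest⟩ := hpre
    rw [List.isEmpty_eq_false_iff] at hp hc
    obtain ⟨p0, ps, rfl⟩ := List.exists_cons_of_ne_nil hp
    obtain ⟨c0, cs, hce⟩ := List.exists_cons_of_ne_nil hc
    have hA : pvOuterA (e :: rest) [p0 :: ps] cnt =
        (match (pvLocal e).head?, (p0 :: ps).head? with
         | some c0', some q0 =>
           if c0' ≠ q0 then pvOuterA rest [pvLocal e] cnt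
           else
             match pvInnerA (p0 :: ps) (p0 :: ps) (pvLocal e) cnt with
             | some cnt2 => pvOuterA rest [pvLocal e] cnt2
             | none => none
         | _, _ => none) := rfl
    have hB : pvOuterB (e :: rest) (some (p0 :: ps)) cnt =
        (match p0 :: ps, pvLocal e with
         | q0 :: _, c0' :: _ =>
           if q0 = c0' then
             pvOuterB rest (some (pvLocal e)) (cnt + pvTwoPointer (p0 :: ps) (pvLocal e) 0)
           else pvOuterB rest (some (pvLocal e)) cnt
         | _, _ => pvOuterB rest (some (pvLocal e)) cnt) := rfl
    have hihr : pvOuterA rest [pvLocal e] = fun k => some (pvOuterB rest (some (pvLocal e)) k) := by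
      funext k
      exact ih (pvLocal e) k hrest
    rw [hA, hB, hce]
    simp only [List.head?_cons]
    by_cases heq : c0 = p0
    · subst heq
      have hsub : ¬ (c0 :: cs).Sublist ((c0 :: ps).dropLast) := by
        intro hs
        rw [← List.isSublist_iff_sublist] at hs
        rw [hce] at hpair
        simp [hs] at hpair
      have hinner := pvInnerA_eq (c0 :: ps) (c0 :: ps) (c0 :: cs) cnt hsub
      simp only [ne_eq, not_true_eq_false, ite_false, hinner]
      rw [← hce, hihr]
      simp
    · have hpc : ¬ p0 = c0 := fun hh => heq hh.symm
      simp only [ne_eq, heq, not_false_eq_true, ite_true, hpc, ite_false]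
      rw [← hce, hihr]

-- ===== VERDICT (by name: the statement is the Claim_ definition above) =====
theorem conta_economia_spec : Claim_equal_conta_economia := by
  unfold Claim_equal_conta_economia
  intro emails _ hpre
  unfold Spec_conta_economia conta_economia conta_economia_alt
  cases emails with
  | nil => simp [pvOuterA, pvOuterB]
  | cons e rest =>
    have h1 : pvOuterA (e :: rest) [] 0 = pvOuterA rest [pvLocal e] 0 := by
      simp [pvOuterA]
    have h2 : pvOuterB (e :: rest) none 0 = pvOuterB rest (some (pvLocal e)) 0 := by
      simp [pvOuterB]
    rw [h1, h2, pvOuter_eq rest (pvLocal e) 0 (by simpa [Pre_conta_economia] using hpre)]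
    simp
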